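-- pv_equiv track=rewrite | github.com/JACK101816/Projects | Python/hog/hog.py | bacon_strategy
-- ===== SOURCE A (Python) =====
-- def free_bacon(opponent_score):
--     """Return the points scored from rolling 0 dice (Free Bacon)."""
--     # BEGIN PROBLEM 2
--     if opponent_score % 10 > opponent_score // 10:
--         return opponent_score % 10 + 1
--     else:
--         return opponent_score // 10 + 1
--
-- def bacon_strategy(score, opponent_score, margin=8, num_rolls=4):
--     """This strategy rolls 0 dice if that gives at least MARGIN points,
--     and rolls NUM_ROLLS otherwise.
--     """
--     # BEGIN PROBLEM 9
--     s = free_bacon(opponent_score)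
--     def is_prime(n):
--         if n < 2:
--             return False
--         k = 2
--         while k < n:
--             if n % k == 0:
--                 return False
--             else:
--                 k = k + 1
--         return True
--
--     def next_prime(n):
--         k = 1
--         while not is_prime(n + k):
--             k = k + 1
--         return n + k
--
--     if is_prime(s):
--         s = next_prime(s)
--
--     if s >= margin:
--         return 0
--     return num_rolls  # Replace this statement
-- ===== SOURCE B (Python) =====
-- def _least_divisor(n):
--     """Smallest divisor >= 2 of n (n itself if none up to sqrt(n)): check 2, then odd d."""
--     if n % 2 == 0:
--         return 2
--     d = 3
--     while d * d <= n:
--         if n % d == 0: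
--             return d
--         d += 2
--     return n
--
-- def _is_prime(n):
--     return n >= 2 and _least_divisor(n) == n
--
-- def _next_prime(t):
--     return t if _is_prime(t) else _next_prime(t + 1)
--
-- def bacon_strategy(score, opponent_score, margin=8, num_rolls=4):
--     """Roll 0 dice if Free Bacon (bumped past a prime) reaches margin, else num_rolls."""
--     s = max(opponent_score % 10, opponent_score // 10) + 1
--     if _is_prime(s):
--         s = _next_prime(s + 1)
--     return 0 if s >= margin else num_rolls
-- ===== Notes on version B (the rewrite author's own statement) =====
-- stated objective: faster
-- what changed: Primality is decided via a least-divisor search (2 first, then only odd candidates, stopping at sqrt(n)) instead of A's scan of every k from 2 to n-1, free_bacon becomes a single max() expression, and the next-prime bump is a recursive search instead of A's offset-counting while loop.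
import Mathlib
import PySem

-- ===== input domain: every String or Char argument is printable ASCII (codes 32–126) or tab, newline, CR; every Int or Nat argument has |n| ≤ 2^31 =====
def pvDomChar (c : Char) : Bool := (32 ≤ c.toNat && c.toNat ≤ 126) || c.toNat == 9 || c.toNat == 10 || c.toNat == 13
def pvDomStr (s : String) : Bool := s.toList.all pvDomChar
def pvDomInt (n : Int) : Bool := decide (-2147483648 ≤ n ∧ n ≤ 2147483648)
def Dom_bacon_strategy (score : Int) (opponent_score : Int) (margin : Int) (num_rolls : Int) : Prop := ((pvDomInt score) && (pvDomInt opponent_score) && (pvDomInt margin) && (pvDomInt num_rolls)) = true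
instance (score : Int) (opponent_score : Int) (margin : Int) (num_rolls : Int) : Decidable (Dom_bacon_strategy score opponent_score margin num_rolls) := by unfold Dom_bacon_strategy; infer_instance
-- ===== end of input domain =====

-- B replaces A's is_prime (trial division by every k < n) by a least-divisor search (2, then
-- only odd candidates, stopping at sqrt), collapses free_bacon into max(...)+1, and makes the
-- next-prime bump a recursive search; same return value.

-- ===== PORT A =====

-- free_bacon: if opponent_score % 10 > opponent_score // 10: … else …
def free_bacon (opponent_score : Int) : Int :=
  if PySem.Int.mod opponent_score 10 > PySem.Int.floordiv opponent_score 10 then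
    PySem.Int.mod opponent_score 10 + 1
  else
    PySem.Int.floordiv opponent_score 10 + 1

-- A's is_prime loop: k = 2; while k < n: if n % k == 0: return False; k += 1; return True
-- (fuel = exact remaining iteration count (n - k).toNat, a totality guard only)
def isPrimeLoopA (n : Int) : Nat → Int → Bool
  | 0, _ => true
  | fuel + 1, k =>
      if k < n then
        if PySem.Int.mod n k = 0 then false else isPrimeLoopA n fuel (k + 1)
      else true

def isPrimeA (n : Int) : Bool := if n < 2 then false else isPrimeLoopA n (n - 2).toNat 2

-- termination bound for A's next_prime search: some prime ≥ n+1 (fuel only)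
def pvBoundA (n : Int) : Int := (Nat.find (Nat.exists_infinite_primes (n.toNat + 1)) : Int)

-- A's next_prime loop: k = 1; while not is_prime(n + k): k += 1; return n + k
-- (fuel (pvBoundA n - n).toNat reaches that prime, so it is never exhausted)
def nextPrimeLoopA (n : Int) : Nat → Int → Int
  | 0, k => n + k
  | fuel + 1, k => if isPrimeA (n + k) then n + k else nextPrimeLoopA n fuel (k + 1)

def next_primeA (n : Int) : Int := nextPrimeLoopA n (pvBoundA n - n).toNat 1

def bacon_strategy (score : Int) (opponent_score : Int) (margin : Int) (num_rolls : Int) : Int :=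
  let s := free_bacon opponent_score
  let s := if isPrimeA s then next_primeA s else s
  if s ≥ margin then 0 else num_rolls

-- ===== PORT B =====

-- B's _least_divisor odd loop: d = 3; while d * d <= n: if n % d == 0: return d; d += 2; return n
-- (fuel (n - 2).toNat bounds the ≤ sqrt(n) iterations, a totality guard only)
def leastDivLoop (n : Int) : Nat → Int → Int
  | 0, _ => n
  | fuel + 1, d =>
      if d * d ≤ n then
        if PySem.Int.mod n d = 0 then d else leastDivLoop n fuel (d + 2)
      else n

-- B's _least_divisor: check 2 first, then odd candidates only
def leastDivisor (n : Int) : Int :=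
  if PySem.Int.mod n 2 = 0 then 2 else leastDivLoop n (n - 2).toNat 3

-- B's _is_prime: n >= 2 and _least_divisor(n) == n
def isPrimeB (n : Int) : Bool := decide (2 ≤ n) && decide (leastDivisor n = n)

-- B's recursive _next_prime(t) = t if _is_prime(t) else _next_prime(t + 1)  (fuel = depth bound)
def nextPrimeB : Nat → Int → Int
  | 0, t => t
  | fuel + 1, t => if isPrimeB t then t else nextPrimeB fuel (t + 1)

-- termination bound for B's recursion: some prime ≥ n+1 (fuel only)
def pvBoundB (n : Int) : Int := (Nat.find (Nat.exists_infinite_primes (1 + n.toNat)) : Int)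

def bacon_strategy_alt (score : Int) (opponent_score : Int) (margin : Int) (num_rolls : Int) : Int :=
  let s := max (PySem.Int.mod opponent_score 10) (PySem.Int.floordiv opponent_score 10) + 1
  let s := if isPrimeB s then nextPrimeB (pvBoundB s - s).toNat (s + 1) else s
  if s ≥ margin then 0 else num_rolls

-- ===== PRECONDITION & SPEC =====
def Spec_bacon_strategy (score : Int) (opponent_score : Int) (margin : Int) (num_rolls : Int) (out : Int) : Prop := out = bacon_strategy_alt score opponent_score margin num_rolls
instance (score : Int) (opponent_score : Int) (margin : Int) (num_rolls : Int) (out : Int) : Decidable (Spec_bacon_strategy score opponent_score margin num_rolls out) := by unfold Spec_bacon_strategy; infer_instance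

-- ===== CLAIM (what is proved, stated in full; the proofs are below) =====
def Claim_equal_bacon_strategy : Prop := ∀ (score : Int) (opponent_score : Int) (margin : Int) (num_rolls : Int), Dom_bacon_strategy score opponent_score margin num_rolls → Spec_bacon_strategy score opponent_score margin num_rolls (bacon_strategy score opponent_score margin num_rolls)

-- ===== LEMMAS AND PROOFS =====

theorem free_bacon_eq (opp : Int) :
    free_bacon opp = max (PySem.Int.mod opp 10) (PySem.Int.floordiv opp 10) + 1 := by
  unfold free_bacon
  split <;> omega

theorem isPrimeLoopA_eq_true_iff (n : Int) : ∀ (f : Nat) (k : Int), (n - k).toNat = f →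
    (isPrimeLoopA n f k = true ↔ ∀ j : Int, k ≤ j → j < n → PySem.Int.mod n j ≠ 0) := by
  intro f
  induction f with
  | zero =>
      intro k hk
      simp only [isPrimeLoopA, true_iff]
      intro j hj1 hj2 _; omega
  | succ f ih =>
      intro k hk
      have hkn : k < n := by omega
      rw [isPrimeLoopA, if_pos hkn]
      by_cases hz : PySem.Int.mod n k = 0
      · rw [if_pos hz]
        simp only [Bool.false_eq_true, false_iff]
        intro h; exact absurd hz (h k le_rfl hkn)
      · rw [if_neg hz, ih (k + 1) (by omega)]
        constructor
        · intro h j hj1 hj2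
          rcases eq_or_lt_of_le hj1 with rfl | h'
          · exact hz
          · exact h j (by omega) hj2
        · intro h j hj1 hj2; exact h j (by omega) hj2

theorem isPrimeA_iff (n : Int) : isPrimeA n = true ↔ n.toNat.Prime := by
  unfold isPrimeA
  by_cases h2 : n < 2
  · simp only [h2, if_pos]
    constructor
    · intro h; cases h
    · intro hp
      have h01 : n.toNat = 0 ∨ n.toNat = 1 := by omega
      rcases h01 with h | h <;> rw [h] at hp
      · exact (Nat.not_prime_zero hp).elim
      · exact (Nat.not_prime_one hp).elim
  · rw [if_neg h2, isPrimeLoopA_eq_true_iff n (n - 2).toNat 2 rfl, Nat.prime_def_lt']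
    push Not at h2
    have hn : (n.toNat : Int) = n := Int.toNat_of_nonneg (by omega)
    constructor
    · intro h
      refine ⟨by omega, fun m hm1 hm2 hdvd => ?_⟩
      refine h (m : Int) (by omega) (by omega) ?_
      rw [PySem.Int.mod_eq_zero_iff_dvd, ← hn]
      exact_mod_cast hdvd
    · rintro ⟨-, h⟩ j hj1 hj2 hz
      rw [PySem.Int.mod_eq_zero_iff_dvd] at hz
      refine h j.toNat (by omega) (by omega) ?_
      have : (j.toNat : Int) ∣ (n.toNat : Int) := by
        rw [hn, Int.toNat_of_nonneg (by omega : (0:Int) ≤ j)]; exact hz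
      exact_mod_cast this

theorem leastDivLoop_eq_self_iff (n : Int) : ∀ (f : Nat) (d : Int), 3 ≤ d → (n + 1 - d).toNat ≤ f →
    (leastDivLoop n f d = n ↔ ∀ j : Int, d ≤ j → j * j ≤ n → j % 2 = d % 2 → PySem.Int.mod n j ≠ 0) := by
  intro f
  induction f with
  | zero =>
      intro d hd3 hf
      simp only [leastDivLoop, true_iff]
      intro j hj1 hj2 _ _
      have h9 : 9 ≤ n := by nlinarith
      have hj : n + 1 ≤ j := by omega
      nlinarith
  | succ f ih =>
      intro d hd3 hf
      rw [leastDivLoop]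
      by_cases hdd : d * d ≤ n
      · rw [if_pos hdd]
        have hdn : d < n := by nlinarith
        by_cases hz : PySem.Int.mod n d = 0
        · rw [if_pos hz]
          constructor
          · intro h; omega
          · intro h; exact absurd hz (h d le_rfl hdd rfl)
        · rw [if_neg hz, ih (d + 2) (by omega) (by omega)]
          constructor
          · intro h j hj1 hj2 hpar
            have : j = d ∨ d + 2 ≤ j := by omega
            rcases this with rfl | h'
            · exact hz
            · exact h j h' hj2 (by omega)
          · intro h j hj1 hj2 hpar; exact h j (by omega) hj2 (by omega)
      · rw [if_neg hdd]
        simp only [true_iff]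
        intro j hj1 hj2 _ _
        nlinarith

theorem isPrimeB_iff (n : Int) : isPrimeB n = true ↔ n.toNat.Prime := by
  unfold isPrimeB leastDivisor
  by_cases h2 : n < 2
  · have : ¬ (2 ≤ n) := by omega
    simp only [this, decide_false, Bool.false_and, Bool.false_eq_true, false_iff]
    intro hp
    have h01 : n.toNat = 0 ∨ n.toNat = 1 := by omega
    rcases h01 with h | h <;> rw [h] at hp
    · exact (Nat.not_prime_zero hp).elim
    · exact (Nat.not_prime_one hp).elim
  · push Not at h2
    have hn : (n.toNat : Int) = n := Int.toNat_of_nonneg (by omega)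
    by_cases hmod : PySem.Int.mod n 2 = 0
    · -- even n: least divisor is 2, prime iff n = 2
      rw [if_pos hmod]
      have hdvd : (2:Int) ∣ n := (PySem.Int.mod_eq_zero_iff_dvd n 2).mp hmod
      constructor
      · intro h
        have h22 : (2:Int) = n := by
          have := Bool.and_eq_true .. ▸ h
          exact of_decide_eq_true this.2
        rw [← h22]; exact Nat.prime_two
      · intro hp
        have hd2 : (2:Nat) ∣ n.toNat := by
          have : (2:Int) ∣ (n.toNat : Int) := hn ▸ hdvd
          exact_mod_cast this
        have := hp.eq_one_or_self_of_dvd 2 hd2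
        have hne : n = 2 := by omega
        subst hne; decide
    · -- odd n ≥ 2 (so n ≥ 3): the odd-candidate loop decides primality
      rw [if_neg hmod]
      have hm2 : PySem.Int.mod n 2 = n % 2 := PySem.Int.mod_eq_emod_of_pos (a := n) (b := 2) (by omega)
      have hodd : n % 2 = 1 := by omega
      rw [hm2] at hmod
      have hn3 : 3 ≤ n := by omega
      have hloop := leastDivLoop_eq_self_iff n (n - 2).toNat 3 le_rfl (by omega)
      rw [Nat.prime_def_le_sqrt]
      constructor
      · intro h
        have hself : leastDivLoop n (n - 2).toNat 3 = n := by
          have := Bool.and_eq_true .. ▸ h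
          exact of_decide_eq_true this.2
        have hfacts := hloop.mp hself
        refine ⟨by omega, fun m hm1 hm2' hdvd => ?_⟩
        have hmm : m * m ≤ n.toNat := Nat.le_sqrt.mp hm2'
        have hmi : ((m : Int)) ∣ n := by
          rw [← hn]; exact_mod_cast hdvd
        have hzz : PySem.Int.mod n (m : Int) = 0 := (PySem.Int.mod_eq_zero_iff_dvd n m).mpr hmi
        have hsq : (m : Int) * m ≤ n := by
          have : ((m * m : Nat) : Int) ≤ (n.toNat : Int) := by exact_mod_cast hmm
          push_cast at this; omega
        by_cases hpar : (m : Int) % 2 = 1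
        · -- odd divisor ≥ 3 is refuted by the loop
          have hm3 : 3 ≤ (m : Int) := by
            rcases Nat.lt_or_ge m 3 with hlt | hge
            · interval_cases m <;> simp_all
            · exact_mod_cast hge
          exact hfacts (m : Int) hm3 hsq (by omega) hzz
        · -- even divisor contradicts n odd
          have : (2:Int) ∣ (m : Int) := by omega
          have h2n : (2:Int) ∣ n := dvd_trans this hmi
          omega
      · rintro ⟨-, h⟩
        have hself : leastDivLoop n (n - 2).toNat 3 = n := by
          refine hloop.mpr ?_
          intro j hj1 hj2 _ hz
          rw [PySem.Int.mod_eq_zero_iff_dvd] at hz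
          refine h j.toNat (by omega) ?_ ?_
          · rw [Nat.le_sqrt]
            have : ((j.toNat * j.toNat : Nat) : Int) ≤ (n.toNat : Int) := by
              push_cast; rw [Int.toNat_of_nonneg (by omega : (0:Int) ≤ j), hn]; exact hj2
            exact_mod_cast this
          · have : (j.toNat : Int) ∣ (n.toNat : Int) := by
              rw [hn, Int.toNat_of_nonneg (by omega : (0:Int) ≤ j)]; exact hz
            exact_mod_cast this
        rw [hself]
        simp [h2]

theorem isPrime_eq (n : Int) : isPrimeA n = isPrimeB n := by
  rw [Bool.eq_iff_iff, isPrimeA_iff, isPrimeB_iff]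

theorem nextLoop_eq (n : Int) : ∀ (f : Nat) (k m : Int), m = n + k →
    nextPrimeLoopA n f k = nextPrimeB f m := by
  intro f
  induction f with
  | zero => rintro k m rfl; rfl
  | succ f ih =>
      rintro k m rfl
      rw [nextPrimeLoopA, nextPrimeB, isPrime_eq]
      by_cases hp : isPrimeB (n + k) = true
      · rw [hp]; simp
      · simp only [Bool.not_eq_true] at hp
        rw [hp]
        simp only [Bool.false_eq_true, if_false]
        exact ih (k + 1) (n + k + 1) (by ring)

theorem pvBound_eq (n : Int) : pvBoundB n = pvBoundA n := by
  unfold pvBoundA pvBoundB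
  have h1 := Nat.find_spec (Nat.exists_infinite_primes (1 + n.toNat))
  have h2 := Nat.find_spec (Nat.exists_infinite_primes (n.toNat + 1))
  have ha : 1 + n.toNat ≤ Nat.find (Nat.exists_infinite_primes (n.toNat + 1)) ∧
      (Nat.find (Nat.exists_infinite_primes (n.toNat + 1))).Prime := ⟨by omega, h2.2⟩
  have hb : n.toNat + 1 ≤ Nat.find (Nat.exists_infinite_primes (1 + n.toNat)) ∧
      (Nat.find (Nat.exists_infinite_primes (1 + n.toNat))).Prime := ⟨by omega, h1.2⟩
  exact congrArg Int.ofNat (le_antisymm (Nat.find_le ha) (Nat.find_le hb))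

theorem bump_eq (s : Int) :
    (if isPrimeA s then next_primeA s else s) =
    (if isPrimeB s then nextPrimeB (pvBoundB s - s).toNat (s + 1) else s) := by
  rw [isPrime_eq]
  by_cases hp : isPrimeB s = true
  · rw [if_pos hp, if_pos hp]
    unfold next_primeA
    rw [pvBound_eq]
    exact nextLoop_eq s (pvBoundA s - s).toNat 1 (s + 1) rfl
  · simp only [Bool.not_eq_true] at hp
    rw [hp]
    simp

-- ===== VERDICT (by name: the statement is the Claim_ definition above) =====
theorem bacon_strategy_spec : Claim_equal_bacon_strategy := by
  intro score opp margin nr _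
  unfold Spec_bacon_strategy
  simp only [bacon_strategy, bacon_strategy_alt, free_bacon_eq, bump_eq]
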